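-- pv_equiv track=rewrite | github.com/thomas-gorree/runtrack-python | jour04/job14/main.py | my_long_word
-- ===== SOURCE A (Python) =====
-- def my_len(phrase):
--
--     count = 0 # La variable count est initialisée à zéro
--
--     #i= a la premier charaquetére 1 elment pour une liste et 1 lettre pour un mot et ensuite il passe au prochain
--
--     for i in phrase: #La boucle for parcourt chaque caractère de phrase un à un, en commençant par le premier
--
--         count += 1#À chaque itération, la variable count est incrémentée de 1
--
--     return count #Après la fin de la boucle, la fonction retourne la valeur de count,
--
-- def ajout(liste, x): # ses la def de append
--
--     liste += [x] # sa dit que j'ajoute x a la liste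
--
--     return list
--
-- def separation(str): #ses une def de split()
--
--     phrase = []# La variable phrase est initialisée à une liste vide.
--
--     mot = "" #La variable mot est initialisée à une chaîne vide
--
--     for i in str:# La boucle for parcourt chaque caractère de la chaîne str un à un, en commençant par le premier
--
--         if i != " ": #Si le caractère 'i' n'est pas un espace, alors il est ajouté à la chaîne "mot"
--
--             mot += i #Si le caractère i est un espace, alors la chaîne mot est ajoutée à la liste phrase
--
--         else:
--
--             ajout(phrase,mot) # en appelant une fonction ajout()
--
--             mot = ""
--
--     return phrase #  puis la variable mot est réinitialisée à une chaîne vide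
--
-- def my_long_word(n,str):
--     mots = separation(str)
--     phrase = ""
--     for i in mots:
--         if my_len(i) > n:
--             phrase += i
--             phrase += " "
--     return phrase
-- ===== SOURCE B (Python) =====
-- def my_long_word(n, str):
--     phrase = ""
--     mot = ""
--     for i in str:
--         if i == " ":
--             if len(mot) > n:
--                 phrase += mot + " "
--             mot = ""
--         else:
--             mot += i
--     return phrase
-- ===== Notes on version B (the rewrite author's own statement) =====
-- stated objective: simpler
-- what changed: B fuses A's two phases (hand-rolled split into a word list, then a filtering concatenation pass using a hand-rolled len) into one single pass over the characters that tests the buffered word with built-in len at each space and never materialises the word list; like A it drops the unterminated last word.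
import Mathlib
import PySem

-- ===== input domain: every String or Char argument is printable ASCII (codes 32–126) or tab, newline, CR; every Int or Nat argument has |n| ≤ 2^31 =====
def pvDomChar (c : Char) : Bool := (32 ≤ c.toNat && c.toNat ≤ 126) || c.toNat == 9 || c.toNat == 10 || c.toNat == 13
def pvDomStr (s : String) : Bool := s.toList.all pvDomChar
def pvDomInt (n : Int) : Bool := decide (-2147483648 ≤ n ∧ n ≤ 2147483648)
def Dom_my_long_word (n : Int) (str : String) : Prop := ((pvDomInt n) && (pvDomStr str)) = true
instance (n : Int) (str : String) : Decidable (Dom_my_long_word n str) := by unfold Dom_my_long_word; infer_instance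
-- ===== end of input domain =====

-- B fuses A's split-then-filter two-pass structure into one single character pass; equal results.
-- Strings are handled on the List Char side (PySem convention).

-- ===== PORT A =====
-- my_len: counts characters one by one
def pv_my_len (phrase : List Char) : Int :=
  phrase.foldl (fun count _ => count + 1) 0

-- separation: hand-rolled split on ' ' (the trailing word in 'mot' is dropped, as in A)
def pv_separation (str : List Char) : List (List Char) :=
  (str.foldl
    (fun (st : List (List Char) × List Char) i =>
      if i ≠ ' ' then (st.1, st.2 ++ [i]) else (st.1 ++ [st.2], []))
    ([], [])).1

def my_long_word (n : Int) (str : String) : String :=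
  String.ofList ((pv_separation str.toList).foldl
    (fun phrase i => if pv_my_len i > n then phrase ++ i ++ [' '] else phrase) [])

-- ===== PORT B =====
def my_long_word_alt (n : Int) (str : String) : String :=
  String.ofList ((str.toList.foldl
    (fun (st : List Char × List Char) i =>
      if i = ' ' then
        (if PySem.Chars.len st.2 > n then st.1 ++ st.2 ++ [' '] else st.1, [])
      else (st.1, st.2 ++ [i]))
    ([], [])).1)

-- ===== PRECONDITION & SPEC =====
def Spec_my_long_word (n : Int) (str : String) (out : String) : Prop := out = my_long_word_alt n str
instance (n : Int) (str : String) (out : String) : Decidable (Spec_my_long_word n str out) := by unfold Spec_my_long_word; infer_instance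

-- ===== CLAIM (what is proved, stated in full; the proofs are below) =====
def Claim_equal_my_long_word : Prop := ∀ (n : Int) (str : String), Dom_my_long_word n str → Spec_my_long_word n str (my_long_word n str)

-- ===== LEMMAS AND PROOFS =====

theorem pv_my_len_go (l : List Char) : ∀ (a : Int),
    l.foldl (fun count _ => count + 1) a = a + l.length := by
  induction l with
  | nil => intro a; simp
  | cons c cs ih => intro a; simp [List.foldl, ih]; omega

theorem pv_my_len_eq (l : List Char) : pv_my_len l = (l.length : Int) := by
  simp [pv_my_len, pv_my_len_go]

-- key fused-loop invariant: filtering the words produced so far equals the fused accumulator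
theorem pv_key (n : Int) : ∀ (cs : List Char) (ws : List (List Char)) (mot : List Char),
    ((cs.foldl
        (fun (st : List (List Char) × List Char) i =>
          if i ≠ ' ' then (st.1, st.2 ++ [i]) else (st.1 ++ [st.2], []))
        (ws, mot)).1).foldl
      (fun phrase i => if pv_my_len i > n then phrase ++ i ++ [' '] else phrase) []
    = (cs.foldl
        (fun (st : List Char × List Char) i =>
          if i = ' ' then
            (if PySem.Chars.len st.2 > n then st.1 ++ st.2 ++ [' '] else st.1, [])
          else (st.1, st.2 ++ [i]))
        (ws.foldl (fun phrase i => if pv_my_len i > n then phrase ++ i ++ [' '] else phrase) [], mot)).1 := by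
  intro cs
  induction cs with
  | nil => intro ws mot; simp
  | cons c cs ih =>
    intro ws mot
    by_cases hc : c = ' '
    · subst hc
      simp only [List.foldl_cons, if_true, ne_eq, not_true_eq_false, if_false]
      rw [ih (ws ++ [mot]) []]
      congr 1
      simp [List.foldl_append, PySem.Chars.len_eq, pv_my_len_eq]
    · simp only [List.foldl_cons, if_pos hc, if_neg hc]
      exact ih ws (mot ++ [c])

-- ===== VERDICT (by name: the statement is the Claim_ definition above) =====
theorem my_long_word_spec : Claim_equal_my_long_word := by
  intro n str _
  show my_long_word n str = my_long_word_alt n str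
  unfold my_long_word my_long_word_alt pv_separation
  rw [pv_key n str.toList [] []]
  rfl
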